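-- pv_equiv track=rewrite | github.com/ga815647/forge | forge/init_chunker.py | _find_split_points
-- ===== SOURCE A (Python) =====
-- def _find_split_points(lines: list[str], chunk_size: int) -> list[int]:
--     """Find natural split points (## > ### > blank lines > hard cut)."""
--     points: list[int] = []
--     i = chunk_size - 1
--     while i < len(lines):
--         best = i
--         for j in range(i, max(i - chunk_size // 2, 0), -1):
--             line = lines[j].strip()
--             if line.startswith("## "):
--                 best = j
--                 break
--             if line.startswith("### "):
--                 best = j
--                 break
--             if line == "" and j < i:
--                 best = j + 1
--                 break
--         points.append(best)
--         i = best + chunk_size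
--     return points
-- ===== SOURCE B (Python) =====
-- def _find_split_points(lines: list[str], chunk_size: int) -> list[int]:
--     """Find natural split points (## > ### > blank lines > hard cut)."""
--     # One classification pass: prev_head[k] / prev_blank[k] = last heading / blank line index <= k.
--     prev_head: list = []
--     prev_blank: list = []
--     last_h = None
--     last_b = None
--     for idx, line in enumerate(lines):
--         s = line.strip()
--         if s.startswith("## ") or s.startswith("### "):
--             last_h = idx
--         elif s == "":
--             last_b = idx
--         prev_head.append(last_h)
--         prev_blank.append(last_b)
--     n = len(lines)
--     points: list = []
--     i = chunk_size - 1
--     while i < n: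
--         low = max(i - chunk_size // 2, 0)
--         jh = prev_head[i]
--         if jh is not None and jh <= low:
--             jh = None
--         jb = prev_blank[i - 1] if i > 0 else None
--         if jb is not None and jb <= low:
--             jb = None
--         if jh is None and jb is None:
--             best = i
--         elif jb is None or (jh is not None and jh > jb):
--             best = jh
--         else:
--             best = jb + 1
--         points.append(best)
--         i = best + chunk_size
--     return points
-- ===== Notes on version B (the rewrite author's own statement) =====
-- stated objective: alternative
-- what changed: Replaces A's per-window backward rescan of the lines with two prefix arrays (last heading index <= k, last blank index <= k) built in one classification pass, so each outer iteration picks the best split point by two O(1) array lookups instead of scanning up to chunk_size//2 lines backwards.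
import Mathlib
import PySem

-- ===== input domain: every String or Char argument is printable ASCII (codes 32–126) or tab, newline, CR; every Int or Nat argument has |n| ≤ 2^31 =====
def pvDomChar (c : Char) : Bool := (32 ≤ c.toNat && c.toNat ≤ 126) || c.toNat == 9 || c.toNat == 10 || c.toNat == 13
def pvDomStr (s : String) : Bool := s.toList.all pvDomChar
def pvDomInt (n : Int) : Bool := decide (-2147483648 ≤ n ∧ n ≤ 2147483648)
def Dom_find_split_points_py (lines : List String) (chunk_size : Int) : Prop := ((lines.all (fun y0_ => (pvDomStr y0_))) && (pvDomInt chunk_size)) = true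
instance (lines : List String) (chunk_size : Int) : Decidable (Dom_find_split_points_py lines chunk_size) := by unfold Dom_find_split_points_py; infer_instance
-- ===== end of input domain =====

-- B replaces A's backward window rescan by two prefix "last heading / last blank index ≤ k"
-- arrays built in one classification pass (alternative decomposition; return value only).

-- ===== PORT A =====
-- the inner `for j in range(i, max(i - chunk_size // 2, 0), -1)` loop with its breaks
def scanA (lines : List String) (i : Int) : List Int → Int
  | [] => i
  | j :: rest =>
      let line := PySem.Str.strip (PySem.List.pyGetD lines j "")
      if PySem.Str.startswith line "## " then j
      else if PySem.Str.startswith line "### " then j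
      else if line == "" && decide (j < i) then j + 1
      else scanA lines i rest

-- the outer `while i < len(lines)` loop; fuel = lines.length + 1 suffices for chunk_size ≥ 1
def loopA (lines : List String) (cs : Int) : Nat → Int → List Int → List Int
  | 0, _, acc => acc
  | fuel + 1, i, acc =>
      if i < (lines.length : Int) then
        let best := scanA lines i (PySem.List.pyRange i (max (i - PySem.Int.floordiv cs 2) 0) (-1))
        loopA lines cs fuel (best + cs) (acc ++ [best])
      else acc

def find_split_points_py (lines : List String) (chunk_size : Int) : List Int :=
  loopA lines chunk_size (lines.length + 1) (chunk_size - 1) []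

-- ===== PORT B =====
-- classification pass: for each index k, last heading index ≤ k and last blank index ≤ k
def buildPrev : List String → Int → Option Int → Option Int → List (Option Int) × List (Option Int)
  | [], _, _, _ => ([], [])
  | s :: rest, idx, lastH, lastB =>
      let t := PySem.Str.strip s
      let lastH' := if PySem.Str.startswith t "## " || PySem.Str.startswith t "### " then some idx else lastH
      let lastB' := if PySem.Str.startswith t "## " || PySem.Str.startswith t "### " then lastB
                    else if t == "" then some idx else lastB
      let r := buildPrev rest (idx + 1) lastH' lastB'
      (lastH' :: r.1, lastB' :: r.2)

def loopB (lines : List String) (cs : Int) (ph pb : List (Option Int)) : Nat → Int → List Int → List Int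
  | 0, _, acc => acc
  | fuel + 1, i, acc =>
      if i < (lines.length : Int) then
        let low := max (i - PySem.Int.floordiv cs 2) 0
        let jh := match PySem.List.pyGetD ph i none with
                  | some h => if h ≤ low then none else some h
                  | none => none
        let jb := match (if 0 < i then PySem.List.pyGetD pb (i - 1) none else none) with
                  | some b => if b ≤ low then none else some b
                  | none => none
        let best := match jh, jb with
                    | none, none => i
                    | some h, none => h
                    | none, some b => b + 1
                    | some h, some b => if b < h then h else b + 1
        loopB lines cs ph pb fuel (best + cs) (acc ++ [best])
      else acc

def find_split_points_py_alt (lines : List String) (chunk_size : Int) : List Int :=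
  let r := buildPrev lines 0 none none
  loopB lines chunk_size r.1 r.2 (lines.length + 1) (chunk_size - 1) []

-- ===== PRECONDITION & SPEC =====
-- Pre_ excludes chunk_size ≤ 0, on which A never returns (the while loop runs forever because i never increases past len(lines)).
def Pre_find_split_points_py (lines : List String) (chunk_size : Int) : Prop := 1 ≤ chunk_size
instance (lines : List String) (chunk_size : Int) : Decidable (Pre_find_split_points_py lines chunk_size) := by unfold Pre_find_split_points_py; infer_instance
def pvWitness_find_split_points_py : List String × Int := (["## title", "", "text a", "text b", "### sub", "text c"], 3)

def Spec_find_split_points_py (lines : List String) (chunk_size : Int) (out : List Int) : Prop := out = find_split_points_py_alt lines chunk_size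
instance (lines : List String) (chunk_size : Int) (out : List Int) : Decidable (Spec_find_split_points_py lines chunk_size out) := by unfold Spec_find_split_points_py; infer_instance

-- ===== CLAIM (what is proved, stated in full; the proofs are below) =====
def Claim_equal_find_split_points_py : Prop := ∀ (lines : List String) (chunk_size : Int), Dom_find_split_points_py lines chunk_size → Pre_find_split_points_py lines chunk_size → Spec_find_split_points_py lines chunk_size (find_split_points_py lines chunk_size)

-- ===== LEMMAS AND PROOFS =====

-- abstract one classification step (uH = heading update, uB = blank update)
def uH (idx : Int) (s : String) (acc : Option Int) : Option Int :=
  let t := PySem.Str.strip s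
  if PySem.Str.startswith t "## " || PySem.Str.startswith t "### " then some idx else acc

def uB (idx : Int) (s : String) (acc : Option Int) : Option Int :=
  let t := PySem.Str.strip s
  if PySem.Str.startswith t "## " || PySem.Str.startswith t "### " then acc
  else if t == "" then some idx else acc

-- value at index k of the prefix array built by folding u over ls from accumulator acc
def prevSpec (u : Int → String → Option Int → Option Int) : List String → Int → Option Int → Nat → Option Int
  | [], _, acc, _ => acc
  | s :: rest, idx, acc, k =>
      let acc' := u idx s acc
      match k with
      | 0 => acc'
      | Nat.succ k' => prevSpec u rest (idx + 1) acc' k'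

-- Int-indexed form (negative index = empty prefix)
def wI (u : Int → String → Option Int → Option Int) (lines : List String) (k : Int) : Option Int :=
  if k < 0 then none else prevSpec u lines 0 none k.toNat

-- what one outer iteration of B computes, as a function of the window top k (for the induction)
def bestSpec (lines : List String) (i low k : Int) : Int :=
  let jh := match wI uH lines k with
            | some h => if h ≤ low then none else some h
            | none => none
  let jb := match wI uB lines (min k (i - 1)) with
            | some b => if b ≤ low then none else some b
            | none => none
  match jh, jb with
  | none, none => i
  | some h, none => h
  | none, some b => b + 1
  | some h, some b => if b < h then h else b + 1

theorem buildPrev_getElem? : ∀ (ls : List String) (idx : Int) (lH lB : Option Int) (k : Nat), k < ls.length →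
    ((buildPrev ls idx lH lB).1)[k]? = some (prevSpec uH ls idx lH k)
    ∧ ((buildPrev ls idx lH lB).2)[k]? = some (prevSpec uB ls idx lB k) := by
  intro ls
  induction ls with
  | nil => intro idx lH lB k hk; simp at hk
  | cons s rest ih =>
    intro idx lH lB k hk
    cases k with
    | zero => simp [buildPrev, prevSpec, uH, uB]
    | succ k' =>
      have hk' : k' < rest.length := by simpa using hk
      have := ih (idx + 1)
        (if PySem.Str.startswith (PySem.Str.strip s) "## " || PySem.Str.startswith (PySem.Str.strip s) "### " then some idx else lH)
        (if PySem.Str.startswith (PySem.Str.strip s) "## " || PySem.Str.startswith (PySem.Str.strip s) "### " then lB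
         else if PySem.Str.strip s == "" then some idx else lB) k' hk'
      simpa [buildPrev, prevSpec, uH, uB] using this

theorem prevSpec_succ : ∀ (ls : List String) (u : Int → String → Option Int → Option Int) (idx : Int) (acc : Option Int) (k : Nat), k + 1 < ls.length →
    prevSpec u ls idx acc (k + 1) = u (idx + (k + 1)) (ls.getD (k + 1) "") (prevSpec u ls idx acc k) := by
  intro ls
  induction ls with
  | nil => intro u idx acc k hk; simp at hk
  | cons s rest ih =>
    intro u idx acc k hk
    cases k with
    | zero =>
      cases rest with
      | nil => simp at hk
      | cons r rest' => simp [prevSpec]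
    | succ k' =>
      have hk' : k' + 1 < rest.length := by simpa using hk
      have := ih u (idx + 1) (u idx s acc) k' hk'
      simp only [prevSpec]
      rw [this]
      congr 1
      omega

-- step recurrence for the Int-indexed prefix value
theorem wI_step (u : Int → String → Option Int → Option Int) (lines : List String) (k : Int)
    (h0 : 0 ≤ k) (hk : k < (lines.length : Int)) :
    wI u lines k = u k (lines.getD k.toNat "") (wI u lines (k - 1)) := by
  rcases eq_or_lt_of_le h0 with h | h
  · -- k = 0
    subst h
    have hne : lines ≠ [] := by
      cases lines with
      | nil => simp at hk
      | cons a l => simp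
    cases lines with
    | nil => simp at hk
    | cons s rest => simp [wI, prevSpec]
  · -- 0 < k
    have h1 : ¬ k < 0 := by omega
    have h2 : ¬ k - 1 < 0 := by omega
    have h3 : k.toNat = (k - 1).toNat + 1 := by omega
    have h4 : (k - 1).toNat + 1 < lines.length := by omega
    simp only [wI, if_neg h1, if_neg h2, h3]
    rw [prevSpec_succ lines u 0 none (k - 1).toNat h4]
    congr 1
    omega

-- any value stored in the prefix array is a nonneg index ≤ k at which the predicate held
theorem prevSpec_some (u : Int → String → Option Int → Option Int) (P : String → Bool)
    (hu : ∀ idx s acc v, u idx s acc = some v → acc = some v ∨ (v = idx ∧ P s = true)) :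
    ∀ (ls : List String) (idx : Int) (acc : Option Int) (k : Nat) (v : Int),
      prevSpec u ls idx acc k = some v →
      acc = some v ∨ (idx ≤ v ∧ v ≤ idx + k ∧ P (ls.getD (v - idx).toNat "") = true) := by
  intro ls
  induction ls with
  | nil => intro idx acc k v h; simp [prevSpec] at h; exact Or.inl (by simp [h])
  | cons s rest ih =>
    intro idx acc k v h
    cases k with
    | zero =>
      simp only [prevSpec] at h
      rcases hu idx s acc v h with hl | ⟨hv, hP⟩
      · exact Or.inl hl
      · subst hv
        refine Or.inr ⟨le_refl _, by omega, ?_⟩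
        simp
        exact hP
    | succ k' =>
      simp only [prevSpec] at h
      rcases ih (idx + 1) (u idx s acc) k' v h with hl | ⟨hv1, hv2, hP⟩
      · rcases hu idx s acc v hl with hl2 | ⟨hv, hP⟩
        · exact Or.inl hl2
        · subst hv
          refine Or.inr ⟨le_refl _, by omega, ?_⟩
          simp
          exact hP
      · refine Or.inr ⟨by omega, by omega, ?_⟩
        have hsh : (v - idx).toNat = (v - (idx + 1)).toNat + 1 := by omega
        rw [hsh]
        simpa using hP

theorem wI_uH_some (lines : List String) (k v : Int) (h : wI uH lines k = some v) :
    0 ≤ v ∧ v ≤ k ∧ (PySem.Str.startswith (PySem.Str.strip (lines.getD v.toNat "")) "## "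
      || PySem.Str.startswith (PySem.Str.strip (lines.getD v.toNat "")) "### ") = true := by
  have hu : ∀ idx s acc w, uH idx s acc = some w → acc = some w ∨ (w = idx ∧
      (PySem.Str.startswith (PySem.Str.strip s) "## " || PySem.Str.startswith (PySem.Str.strip s) "### ") = true) := by
    intro idx s acc w hw
    simp only [uH] at hw
    by_cases hc : (PySem.Str.startswith (PySem.Str.strip s) "## " || PySem.Str.startswith (PySem.Str.strip s) "### ") = true
    · rw [if_pos hc] at hw; exact Or.inr ⟨(Option.some.inj hw).symm, hc⟩
    · rw [if_neg hc] at hw; exact Or.inl hw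
  unfold wI at h
  by_cases hk : k < 0
  · simp [hk] at h
  · simp only [if_neg hk] at h
    rcases prevSpec_some uH _ hu lines 0 none k.toNat v h with hl | ⟨h1, h2, h3⟩
    · simp at hl
    · refine ⟨h1, by omega, ?_⟩
      simpa using h3

theorem wI_uB_some (lines : List String) (k v : Int) (h : wI uB lines k = some v) :
    0 ≤ v ∧ v ≤ k ∧ (PySem.Str.strip (lines.getD v.toNat "") == "") = true := by
  have hu : ∀ idx s acc w, uB idx s acc = some w → acc = some w ∨ (w = idx ∧
      (PySem.Str.strip s == "") = true) := by
    intro idx s acc w hw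
    simp only [uB] at hw
    by_cases hc : (PySem.Str.startswith (PySem.Str.strip s) "## " || PySem.Str.startswith (PySem.Str.strip s) "### ") = true
    · rw [if_pos hc] at hw; exact Or.inl hw
    · rw [if_neg hc] at hw
      by_cases hb : (PySem.Str.strip s == "") = true
      · rw [if_pos hb] at hw; exact Or.inr ⟨(Option.some.inj hw).symm, hb⟩
      · rw [if_neg hb] at hw; exact Or.inl hw
  unfold wI at h
  by_cases hk : k < 0
  · simp [hk] at h
  · simp only [if_neg hk] at h
    rcases prevSpec_some uB _ hu lines 0 none k.toNat v h with hl | ⟨h1, h2, h3⟩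
    · simp at hl
    · refine ⟨h1, by omega, ?_⟩
      simpa using h3

theorem wI_uH_some' (lines : List String) (k v : Int) (h : wI uH lines k = some v) : 0 ≤ v ∧ v ≤ k :=
  ⟨(wI_uH_some lines k v h).1, (wI_uH_some lines k v h).2.1⟩

theorem wI_uB_some' (lines : List String) (k v : Int) (h : wI uB lines k = some v) : 0 ≤ v ∧ v ≤ k :=
  ⟨(wI_uB_some lines k v h).1, (wI_uB_some lines k v h).2.1⟩

-- the window is empty: B's selection falls back to i
theorem bestSpec_empty (lines : List String) (i low k : Int) (hk : k ≤ low) :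
    bestSpec lines i low k = i := by
  simp only [bestSpec]
  have hjh : (match wI uH lines k with
      | some h => if h ≤ low then none else some h
      | none => none) = (none : Option Int) := by
    cases hH : wI uH lines k with
    | none => rfl
    | some h =>
      have hb := wI_uH_some' lines k h hH
      simp only [if_pos (by omega : h ≤ low)]
  have hjb : (match wI uB lines (min k (i - 1)) with
      | some b => if b ≤ low then none else some b
      | none => none) = (none : Option Int) := by
    cases hB : wI uB lines (min k (i - 1)) with
    | none => rfl
    | some b =>
      have hb := wI_uB_some' lines (min k (i - 1)) b hB
      have : b ≤ low := by
        rcases hb with ⟨_, h2⟩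
        have := min_le_left k (i - 1)
        omega
      simp only [if_pos this]
  rw [hjh, hjb]

-- heading at the window top k: B selects k
theorem bestSpec_head (lines : List String) (i low k : Int)
    (hH : (PySem.Str.startswith (PySem.Str.strip (lines.getD k.toNat "")) "## "
      || PySem.Str.startswith (PySem.Str.strip (lines.getD k.toNat "")) "### ") = true)
    (hlk : low < k)
    (hstep : wI uH lines k = uH k (lines.getD k.toNat "") (wI uH lines (k - 1))) :
    bestSpec lines i low k = k := by
  have hwh : wI uH lines k = some k := by
    rw [hstep]; simp only [uH]; rw [if_pos hH]
  simp only [bestSpec, hwh]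
  rw [if_neg (by omega : ¬ k ≤ low)]
  cases hB : wI uB lines (min k (i - 1)) with
  | none => rfl
  | some b =>
    have hb := wI_uB_some lines (min k (i - 1)) b hB
    have hbk : b < k := by
      by_cases hec : b = k
      · exfalso
        have hbe : PySem.Str.strip (lines.getD b.toNat "") = "" := by
          simpa using hb.2.2
        rw [hec] at hbe
        rw [hbe] at hH
        exact absurd hH (by decide)
      · have := min_le_left k (i - 1)
        omega
    by_cases hbl : b ≤ low
    · dsimp only; rw [if_pos hbl]
    · dsimp only; rw [if_neg hbl]; dsimp only; rw [if_pos hbk]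

-- blank at the window top k (k < i), no heading there: B selects k + 1
theorem bestSpec_blank (lines : List String) (i low k : Int) (hlk : low < k) (hki : k < i)
    (hH : ¬ (PySem.Str.startswith (PySem.Str.strip (lines.getD k.toNat "")) "## "
      || PySem.Str.startswith (PySem.Str.strip (lines.getD k.toNat "")) "### ") = true)
    (hB : (PySem.Str.strip (lines.getD k.toNat "") == "") = true)
    (hstep : wI uH lines k = uH k (lines.getD k.toNat "") (wI uH lines (k - 1)))
    (hstepB : wI uB lines k = uB k (lines.getD k.toNat "") (wI uB lines (k - 1))) :
    bestSpec lines i low k = k + 1 := by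
  have hwh' : wI uH lines k = wI uH lines (k - 1) := by
    rw [hstep]; simp only [uH]; rw [if_neg hH]
  have hwb : wI uB lines k = some k := by
    rw [hstepB]; simp only [uB]; rw [if_neg hH, if_pos hB]
  have hmin : min k (i - 1) = k := by omega
  simp only [bestSpec, hmin, hwb, hwh']
  rw [if_neg (by omega : ¬ k ≤ low)]
  cases hJH : wI uH lines (k - 1) with
  | none => rfl
  | some h =>
    have hb := wI_uH_some' lines (k - 1) h hJH
    by_cases hhl : h ≤ low
    · dsimp only; rw [if_pos hhl]
    · dsimp only; rw [if_neg hhl]; dsimp only; rw [if_neg (by omega : ¬ k < h)]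

-- nothing usable at the window top: shrinking the window does not change B's selection
theorem bestSpec_shrink (lines : List String) (i low k : Int) (hki : k ≤ i)
    (hH : ¬ (PySem.Str.startswith (PySem.Str.strip (lines.getD k.toNat "")) "## "
      || PySem.Str.startswith (PySem.Str.strip (lines.getD k.toNat "")) "### ") = true)
    (hB : k < i → ¬ (PySem.Str.strip (lines.getD k.toNat "") == "") = true)
    (hstep : wI uH lines k = uH k (lines.getD k.toNat "") (wI uH lines (k - 1)))
    (hstepB : wI uB lines k = uB k (lines.getD k.toNat "") (wI uB lines (k - 1))) :
    bestSpec lines i low k = bestSpec lines i low (k - 1) := by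
  have hwh' : wI uH lines k = wI uH lines (k - 1) := by
    rw [hstep]; simp only [uH]; rw [if_neg hH]
  by_cases hkeq : k = i
  · have h1 : min k (i - 1) = i - 1 := by omega
    have h2 : min (k - 1) (i - 1) = i - 1 := by omega
    simp only [bestSpec, hwh', h1, h2]
  · have hki' : k < i := by omega
    have hnb := hB hki'
    have hwb' : wI uB lines k = wI uB lines (k - 1) := by
      rw [hstepB]; simp only [uB]; rw [if_neg hH, if_neg hnb]
    have h1 : min k (i - 1) = k := by omega
    have h2 : min (k - 1) (i - 1) = k - 1 := by omega
    simp only [bestSpec, hwh', hwb', h1, h2]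

-- the inner backward scan of A equals B's prefix-array selection
theorem scan_eq (lines : List String) (i low : Int) (h0 : 0 ≤ low) :
    ∀ (n : Nat) (k : Int), k - low = n → k ≤ i → k < (lines.length : Int) →
      scanA lines i (PySem.List.pyRange k low (-1)) = bestSpec lines i low k := by
  intro n
  induction n with
  | zero =>
    intro k hkl hki hklen
    have hk : k = low := by omega
    rw [PySem.List.pyRange_neg_one_eq_nil (by omega : k ≤ low)]
    simp only [scanA]
    rw [bestSpec_empty lines i low k (by omega)]
  | succ n ih =>
    intro k hkl hki hklen
    have hlk : low < k := by omega
    have h0k : 0 ≤ k := by omega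
    have hpg : PySem.List.pyGetD lines k "" = lines.getD k.toNat "" := by
      rw [PySem.List.pyGetD_eq_getElem lines "" h0k hklen]
      rw [List.getD_eq_getElem lines "" (by omega)]
    rw [PySem.List.pyRange_neg_one_cons hlk]
    simp only [scanA, hpg]
    set S := lines.getD k.toNat "" with hS
    have hstep := wI_step uH lines k h0k hklen
    have hstepB := wI_step uB lines k h0k hklen
    by_cases h1 : PySem.Str.startswith (PySem.Str.strip S) "## " = true
    · -- heading "## " at k
      rw [if_pos h1]
      exact (bestSpec_head lines i low k (by simp only [Bool.or_eq_true]; exact Or.inl h1) hlk hstep).symm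
    · rw [if_neg h1]
      by_cases h2 : PySem.Str.startswith (PySem.Str.strip S) "### " = true
      · rw [if_pos h2]
        exact (bestSpec_head lines i low k (by simp only [Bool.or_eq_true]; exact Or.inr h2) hlk hstep).symm
      · rw [if_neg h2]
        have hH : ¬ (PySem.Str.startswith (PySem.Str.strip S) "## "
            || PySem.Str.startswith (PySem.Str.strip S) "### ") = true := by
          simp only [Bool.or_eq_true, not_or]; exact ⟨h1, h2⟩
        by_cases h3 : (PySem.Str.strip S == "") = true ∧ k < i
        · -- blank strictly below i
          rw [if_pos (by simp [h3.1, h3.2])]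
          exact (bestSpec_blank lines i low k hlk h3.2 hH h3.1 hstep hstepB).symm
        · rw [if_neg (by simpa [Decidable.not_and_iff_or_not] using h3)]
          rw [ih (k - 1) (by omega) (by omega) (by omega)]
          exact (bestSpec_shrink lines i low k hki hH (fun hk => (h3 ⟨·, hk⟩)) hstep hstepB).symm

theorem buildPrev_length : ∀ (ls : List String) (idx : Int) (lH lB : Option Int),
    (buildPrev ls idx lH lB).1.length = ls.length ∧ (buildPrev ls idx lH lB).2.length = ls.length := by
  intro ls
  induction ls with
  | nil => intro idx lH lB; simp [buildPrev]
  | cons s rest ih =>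
    intro idx lH lB
    simp only [buildPrev, List.length_cons]
    constructor <;> simp [ (ih (idx + 1) _ _).1, (ih (idx + 1) _ _).2 ]

theorem lookup_ph (lines : List String) (i : Int) (h0 : 0 ≤ i) (hi : i < (lines.length : Int)) :
    PySem.List.pyGetD (buildPrev lines 0 none none).1 i none = wI uH lines i := by
  have hlen := (buildPrev_length lines 0 none none).1
  have hlt : i.toNat < lines.length := by omega
  rw [PySem.List.pyGetD_eq_getElem _ none h0 (by omega)]
  have hg := (buildPrev_getElem? lines 0 none none i.toNat hlt).1
  have : ((buildPrev lines 0 none none).1)[i.toNat]'(by omega) = prevSpec uH lines 0 none i.toNat := by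
    rw [← Option.some_inj, ← List.getElem?_eq_getElem, hg]
  rw [this, wI, if_neg (by omega : ¬ i < 0)]

theorem lookup_pb (lines : List String) (i : Int) (h0 : 0 ≤ i) (hi : i < (lines.length : Int)) :
    (if 0 < i then PySem.List.pyGetD (buildPrev lines 0 none none).2 (i - 1) none else none)
      = wI uB lines (i - 1) := by
  by_cases hz : 0 < i
  · rw [if_pos hz]
    have hlen := (buildPrev_length lines 0 none none).2
    have hlt : (i - 1).toNat < lines.length := by omega
    rw [PySem.List.pyGetD_eq_getElem _ none (by omega) (by omega)]
    have hg := (buildPrev_getElem? lines 0 none none (i - 1).toNat hlt).2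
    have : ((buildPrev lines 0 none none).2)[(i - 1).toNat]'(by omega) = prevSpec uB lines 0 none (i - 1).toNat := by
      rw [← Option.some_inj, ← List.getElem?_eq_getElem, hg]
    rw [this, wI, if_neg (by omega : ¬ i - 1 < 0)]
  · rw [if_neg hz]
    rw [wI, if_pos (by omega : i - 1 < 0)]

theorem bestSpec_nonneg (lines : List String) (i low k : Int) (h0i : 0 ≤ i) (hl0 : 0 ≤ low) :
    0 ≤ bestSpec lines i low k := by
  simp only [bestSpec]
  cases hwh : wI uH lines k with
  | none =>
    cases hwb : wI uB lines (min k (i - 1)) with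
    | none => exact h0i
    | some b =>
      dsimp only
      by_cases hbl : b ≤ low
      · rw [if_pos hbl]; exact h0i
      · rw [if_neg hbl]; dsimp only; omega
  | some h =>
    dsimp only
    by_cases hhl : h ≤ low
    · rw [if_pos hhl]
      cases hwb : wI uB lines (min k (i - 1)) with
      | none => exact h0i
      | some b =>
        dsimp only
        by_cases hbl : b ≤ low
        · rw [if_pos hbl]; exact h0i
        · rw [if_neg hbl]; dsimp only; omega
    · rw [if_neg hhl]
      cases hwb : wI uB lines (min k (i - 1)) with
      | none => dsimp only; omega
      | some b =>
        dsimp only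
        by_cases hbl : b ≤ low
        · rw [if_pos hbl]; dsimp only; omega
        · rw [if_neg hbl]; dsimp only
          by_cases hbh : b < h
          · rw [if_pos hbh]; omega
          · rw [if_neg hbh]; omega

theorem loop_eq (lines : List String) (cs : Int) (hcs : 1 ≤ cs) :
    ∀ (fuel : Nat) (i : Int) (acc : List Int), 0 ≤ i →
      loopA lines cs fuel i acc
        = loopB lines cs (buildPrev lines 0 none none).1 (buildPrev lines 0 none none).2 fuel i acc := by
  intro fuel
  induction fuel with
  | zero => intro i acc _; rfl
  | succ fuel ih =>
    intro i acc h0i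
    by_cases hi : i < (lines.length : Int)
    · have hd2 : 0 ≤ PySem.Int.floordiv cs 2 := by
        rw [PySem.Int.floordiv_eq_ediv_of_pos (by norm_num)]
        exact Int.ediv_nonneg (by omega) (by norm_num)
      have hlow0 : (0 : Int) ≤ max (i - PySem.Int.floordiv cs 2) 0 := le_max_right _ _
      have hlowi : max (i - PySem.Int.floordiv cs 2) 0 ≤ i := max_le (by omega) h0i
      have hscan := scan_eq lines i (max (i - PySem.Int.floordiv cs 2) 0) hlow0
        (i - max (i - PySem.Int.floordiv cs 2) 0).toNat i (by omega) le_rfl hi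
      have hbest0 : 0 ≤ bestSpec lines i (max (i - PySem.Int.floordiv cs 2) 0) i :=
        bestSpec_nonneg lines i _ i h0i hlow0
      have hstepA : loopA lines cs (fuel + 1) i acc
          = loopA lines cs fuel (bestSpec lines i (max (i - PySem.Int.floordiv cs 2) 0) i + cs)
              (acc ++ [bestSpec lines i (max (i - PySem.Int.floordiv cs 2) 0) i]) := by
        simp only [loopA]
        rw [if_pos hi, hscan]
      have hstepB : loopB lines cs (buildPrev lines 0 none none).1 (buildPrev lines 0 none none).2 (fuel + 1) i acc
          = loopB lines cs (buildPrev lines 0 none none).1 (buildPrev lines 0 none none).2 fuel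
              (bestSpec lines i (max (i - PySem.Int.floordiv cs 2) 0) i + cs)
              (acc ++ [bestSpec lines i (max (i - PySem.Int.floordiv cs 2) 0) i]) := by
        simp only [loopB]
        rw [if_pos hi, lookup_ph lines i h0i hi, lookup_pb lines i h0i hi,
            (by rw [min_eq_right (by omega)] :
              wI uB lines (i - 1) = wI uB lines (min i (i - 1)))]
        rfl
      rw [hstepA, hstepB]
      exact ih _ _ (by omega)
    · simp only [loopA, loopB]
      rw [if_neg hi, if_neg hi]

-- ===== VERDICT (by name: the statement is the Claim_ definition above) =====
theorem find_split_points_py_spec : Claim_equal_find_split_points_py := by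
  intro lines cs _ hpre
  unfold Pre_find_split_points_py at hpre
  unfold Spec_find_split_points_py find_split_points_py find_split_points_py_alt
  exact loop_eq lines cs hpre (lines.length + 1) (cs - 1) [] (by omega)
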